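-- pv_equiv track=rewrite | github.com/Abhishek-28-eng/DGPrediction | src/Seventh.py | find_top_interests
-- ===== SOURCE A (Python) =====
-- def find_top_interests(row):
--     # Exclude the Unique_ID column
--     subject_marks = {subject: mark for subject, mark in row.items() if subject != "Unique_ID"}
--
--     # Find the highest and second-highest marks
--     unique_marks = sorted(set(subject_marks.values()), reverse=True)
--     if len(unique_marks) >= 2:
--         top_marks = unique_marks[:2]  # Top two unique marks
--     elif len(unique_marks) == 1:
--         top_marks = unique_marks  # Only one unique mark
--     else:
--         top_marks = []  # No marks present
--
--     # Collect all subjects with marks in top_marks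
--     top_subjects = [subject for subject, mark in subject_marks.items() if mark in top_marks]
--     return ", ".join(top_subjects)
-- ===== SOURCE B (Python) =====
-- def find_top_interests(row):
--     # One linear pass maintaining the top two DISTINCT marks, instead of sort-the-set.
--     best1 = None
--     best2 = None
--     for subject, mark in row.items():
--         if subject == "Unique_ID":
--             continue
--         if best1 is None or mark > best1:
--             best2 = best1
--             best1 = mark
--         elif mark != best1 and (best2 is None or mark > best2):
--             best2 = mark
--     top_subjects = [s for s, m in row.items() if s != "Unique_ID" and (m == best1 or m == best2)]
--     return ", ".join(top_subjects)
-- ===== Notes on version B (the rewrite author's own statement) =====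
-- stated objective: alternative
-- what changed: Replaces building the set of marks and sorting it descending with a single linear pass that maintains the top two distinct mark values (best1/best2), then collects the matching subjects in one order-preserving pass.
import Mathlib
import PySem

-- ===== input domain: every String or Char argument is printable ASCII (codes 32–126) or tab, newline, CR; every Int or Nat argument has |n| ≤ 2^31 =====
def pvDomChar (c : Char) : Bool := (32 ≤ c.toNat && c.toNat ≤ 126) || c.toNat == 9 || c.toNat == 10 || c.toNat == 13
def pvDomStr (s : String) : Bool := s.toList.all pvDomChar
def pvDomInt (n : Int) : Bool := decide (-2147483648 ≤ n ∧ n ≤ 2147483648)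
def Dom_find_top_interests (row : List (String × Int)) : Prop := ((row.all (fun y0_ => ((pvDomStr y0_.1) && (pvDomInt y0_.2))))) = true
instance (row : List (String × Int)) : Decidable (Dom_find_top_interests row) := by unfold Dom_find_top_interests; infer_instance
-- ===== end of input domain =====

-- B replaces A's sort-the-set-of-marks by a single pass keeping the top two distinct marks (alternative algorithm); equivalence proved on all inputs.

-- ===== PORT A =====
-- dict-comprehension step: {subject: mark for subject, mark in row.items() if subject != "Unique_ID"}
def pvStepA (d : PySem.Dict String Int) (p : String × Int) : PySem.Dict String Int :=
  if p.1 ≠ "Unique_ID" then d.insert p.1 p.2 else d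

def find_top_interests (row : List (String × Int)) : String :=
  let subject_marks := (PySem.Dict.ofList row).items.foldl pvStepA PySem.Dict.empty
  let unique_marks := PySem.List.sorted (PySem.Set.ofList subject_marks.values) (fun x => x) true
  let top_marks := if 2 ≤ unique_marks.length then PySem.List.slice unique_marks none (some 2)
    else if unique_marks.length = 1 then unique_marks else []
  let top_subjects := (subject_marks.items.filter (fun p => top_marks.contains p.2)).map (fun p => p.1)
  PySem.Str.join ", " top_subjects

-- ===== PORT B =====
-- loop body of Source B: skip Unique_ID, then update (best1, best2)
def pvStepB (b : Option Int × Option Int) (p : String × Int) : Option Int × Option Int :=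
  if p.1 == "Unique_ID" then b
  else match b.1 with
  | none => (some p.2, b.1)
  | some v1 =>
    if v1 < p.2 then (some p.2, b.1)
    else if p.2 ≠ v1 then
      (match b.2 with
       | none => (b.1, some p.2)
       | some v2 => if v2 < p.2 then (b.1, some p.2) else b)
    else b

def find_top_interests_alt (row : List (String × Int)) : String :=
  let best := (PySem.Dict.ofList row).items.foldl pvStepB (none, none)
  let top_subjects := ((PySem.Dict.ofList row).items.filter
      (fun p => p.1 != "Unique_ID" && (best.1 == some p.2 || best.2 == some p.2))).map (fun p => p.1)
  PySem.Str.join ", " top_subjects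

-- ===== PRECONDITION & SPEC =====
def Spec_find_top_interests (row : List (String × Int)) (out : String) : Prop := out = find_top_interests_alt row
instance (row : List (String × Int)) (out : String) : Decidable (Spec_find_top_interests row out) := by unfold Spec_find_top_interests; infer_instance

-- ===== CLAIM (what is proved, stated in full; the proofs are below) =====
def Claim_equal_find_top_interests : Prop := ∀ (row : List (String × Int)), Dom_find_top_interests row → Spec_find_top_interests row (find_top_interests row)

-- ===== LEMMAS AND PROOFS =====

def pvStep2 (b : Option Int × Option Int) (m : Int) : Option Int × Option Int :=
  match b.1 with
  | none => (some m, b.1)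
  | some v1 =>
    if v1 < m then (some m, b.1)
    else if m ≠ v1 then
      (match b.2 with
       | none => (b.1, some m)
       | some v2 => if v2 < m then (b.1, some m) else b)
    else b

def pvSndmax (ds : List Int) : Option Int :=
  match ds.max? with
  | none => none
  | some M => (ds.filter (fun x => decide (x ≠ M))).max?

theorem pv_max?_concat (l : List Int) (a : Int) :
    (l ++ [a]).max? = some (l.max?.elim a (fun b => max b a)) := by
  induction l with
  | nil => simp
  | cons x xs ih =>
    rw [List.cons_append, List.max?_cons, ih, List.max?_cons]
    cases h : xs.max? <;> simp [max_assoc]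

theorem pv_fold2 (ds : List Int) :
    ds.foldl pvStep2 (none, none) = (ds.max?, pvSndmax ds) := by
  induction ds using List.reverseRecOn with
  | nil => simp [pvSndmax]
  | append_singleton ds m ih =>
    rw [List.foldl_append, ih, List.foldl_cons, List.foldl_nil]
    cases hM : ds.max? with
    | none =>
      have hnil : ds = [] := List.max?_eq_none_iff.mp hM
      subst hnil
      simp [pvStep2, pvSndmax]
    | some M =>
      have hmem : M ∈ ds ∧ ∀ x ∈ ds, x ≤ M := List.max?_eq_some_iff.mp hM
      have hcat := pv_max?_concat ds m
      rw [hM] at hcat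
      simp only [Option.elim] at hcat
      have hps : pvSndmax ds = (ds.filter (fun x => decide (x ≠ M))).max? := by
        simp only [pvSndmax, hM]
      by_cases hlt : M < m
      · have hmax : max M m = m := max_eq_right (le_of_lt hlt)
        rw [hmax] at hcat
        have hfilter : (ds ++ [m]).filter (fun x => decide (x ≠ m)) = ds := by
          have h1 : ds.filter (fun x => decide (x ≠ m)) = ds :=
            List.filter_eq_self.mpr (fun x hx => by
              simp only [decide_eq_true_eq]
              exact ne_of_lt (lt_of_le_of_lt (hmem.2 x hx) hlt))
          rw [List.filter_append, h1]
          simp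
        have hsnd : pvSndmax (ds ++ [m]) = some M := by
          simp only [pvSndmax, hcat, hfilter, hM]
        rw [hcat, hsnd]
        simp [pvStep2, hlt]
      · by_cases hne : m = M
        · subst hne
          rw [max_self] at hcat
          have hsnd : pvSndmax (ds ++ [m]) = pvSndmax ds := by
            simp only [pvSndmax, hcat, hM, List.filter_append]
            simp
          rw [hcat, hsnd, hps]
          simp [pvStep2]
        · have hmM : m < M := lt_of_le_of_ne (not_lt.mp hlt) hne
          rw [max_eq_left (le_of_lt hmM)] at hcat
          have hfilter : (ds ++ [m]).filter (fun x => decide (x ≠ M)) = ds.filter (fun x => decide (x ≠ M)) ++ [m] := by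
            rw [List.filter_append]; simp [hne]
          have hsnd : pvSndmax (ds ++ [m]) = some (((ds.filter (fun x => decide (x ≠ M))).max?).elim m (fun b => max b m)) := by
            simp only [pvSndmax, hcat, hfilter, pv_max?_concat]
          rw [hcat, hsnd, hps]
          cases h2 : (ds.filter (fun x => decide (x ≠ M))).max? with
          | none => simp [pvStep2, hlt, hne]
          | some v2 =>
            simp only [Option.elim]
            by_cases h3 : v2 < m
            · have h4 : max v2 m = m := max_eq_right (le_of_lt h3)
              simp [pvStep2, hlt, hne, h3, h4]
            · have h4 : max v2 m = v2 := max_eq_left (not_lt.mp h3)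
              simp [pvStep2, hlt, hne, h3, h4]

theorem pv_stepB_eq (b : Option Int × Option Int) (p : String × Int) :
    pvStepB b p = if p.1 == "Unique_ID" then b else pvStep2 b p.2 := rfl

theorem pv_foldB_skip (l : List (String × Int)) (b : Option Int × Option Int) :
    l.foldl pvStepB b = ((l.filter (fun p => p.1 != "Unique_ID")).map Prod.snd).foldl pvStep2 b := by
  induction l generalizing b with
  | nil => rfl
  | cons p l ih =>
    by_cases h : p.1 = "Unique_ID" <;>
      simp [h, pv_stepB_eq, ih]

theorem pv_topA (u vals : List Int) (hpw : u.Pairwise (fun a b => b < a))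
    (hmem : ∀ x, x ∈ u ↔ x ∈ vals) :
    (if 2 ≤ u.length then u.take 2 else if u.length = 1 then u else [])
      = (match vals.max? with
         | none => []
         | some M =>
           match (vals.filter (fun x => decide (x ≠ M))).max? with
           | none => [M]
           | some M2 => [M, M2]) := by
  match u with
  | [] =>
    have hv : vals = [] := List.eq_nil_iff_forall_not_mem.mpr (fun x hx => by
      have := (hmem x).mpr hx; simp at this)
    subst hv
    simp
  | [M] =>
    have hMv : M ∈ vals := (hmem M).mp (by simp)
    have hmax : vals.max? = some M := List.max?_eq_some_iff.mpr
      ⟨hMv, fun x hx => by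
        have := (hmem x).mpr hx; simp at this; omega⟩
    have hfil : vals.filter (fun x => decide (x ≠ M)) = [] := by
      rw [List.filter_eq_nil_iff]
      intro x hx
      have := (hmem x).mpr hx; simp at this; simp [this]
    simp only [hmax, hfil, List.max?_nil, List.length_singleton]
    norm_num
  | M :: M2 :: rest =>
    have hM1 : ∀ y ∈ M2 :: rest, y < M := (List.pairwise_cons.mp hpw).1
    have hpw2 := (List.pairwise_cons.mp hpw).2
    have hM2 : ∀ y ∈ rest, y < M2 := (List.pairwise_cons.mp hpw2).1
    have hmax : vals.max? = some M := List.max?_eq_some_iff.mpr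
      ⟨(hmem M).mp (by simp), fun x hx => by
        have hxu := (hmem x).mpr hx
        rcases List.mem_cons.mp hxu with h | h
        · omega
        · exact le_of_lt (hM1 x h)⟩
    have hM2M : M2 < M := hM1 M2 (by simp)
    have hsnd : (vals.filter (fun x => decide (x ≠ M))).max? = some M2 := by
      apply List.max?_eq_some_iff.mpr
      constructor
      · rw [List.mem_filter]
        exact ⟨(hmem M2).mp (by simp), by simp; omega⟩
      · intro x hx
        rw [List.mem_filter] at hx
        have hxu := (hmem x).mpr hx.1
        have hne : x ≠ M := by simpa using hx.2
        rcases List.mem_cons.mp hxu with h | h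
        · omega
        · rcases List.mem_cons.mp h with h' | h'
          · omega
          · exact le_of_lt (hM2 x h')
    have hlen : 2 ≤ (M :: M2 :: rest).length := by simp
    rw [if_pos hlen]
    simp only [hmax, hsnd, List.take_succ_cons, List.take_zero]

theorem pv_dict_items (l : List (String × Int)) (d : PySem.Dict String Int)
    (hnd : (l.map Prod.fst).Nodup) (hdisj : ∀ p ∈ l, d.contains p.1 = false) :
    (l.foldl pvStepA d).items = d.items ++ l.filter (fun p => p.1 != "Unique_ID") := by
  induction l generalizing d with
  | nil => simp
  | cons p l ih =>
    simp only [List.map_cons, List.nodup_cons] at hnd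
    rw [List.foldl_cons, List.filter_cons]
    by_cases h : p.1 = "Unique_ID"
    · have hstep : pvStepA d p = d := by simp [pvStepA, h]
      rw [hstep, ih d hnd.2 (fun q hq => hdisj q (List.mem_cons_of_mem _ hq))]
      simp [h]
    · have hstep : pvStepA d p = d.insert p.1 p.2 := by simp [pvStepA, h]
      have hc : d.contains p.1 = false := hdisj p (List.mem_cons_self ..)
      have hitems : (d.insert p.1 p.2).items = d.items ++ [(p.1, p.2)] :=
        PySem.Dict.items_insert_of_not_contains _ _ hc
      have hdisj' : ∀ q ∈ l, (d.insert p.1 p.2).contains q.1 = false := by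
        intro q hq
        rw [PySem.Dict.contains_insert]
        have hne : q.1 ≠ p.1 := by
          intro he
          exact hnd.1 (he ▸ List.mem_map_of_mem hq)
        simp [hne, hdisj q (List.mem_cons_of_mem _ hq)]
      rw [hstep, ih _ hnd.2 hdisj', hitems]
      simp [h]


def pvTop (ds : List Int) : List Int :=
  match ds.max? with
  | none => []
  | some M =>
    match (ds.filter (fun x => decide (x ≠ M))).max? with
    | none => [M]
    | some M2 => [M, M2]

theorem pv_main (row : List (String × Int)) :
    find_top_interests row = find_top_interests_alt row := by
  simp only [find_top_interests, find_top_interests_alt]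
  have hnd : (((PySem.Dict.ofList row).items).map Prod.fst).Nodup := by
    have h := PySem.Dict.nodup_keys_ofList row
    simpa [PySem.Dict.keys] using h
  set l := (PySem.Dict.ofList row).items with hl
  have hitems : (l.foldl pvStepA PySem.Dict.empty).items
      = l.filter (fun p => p.1 != "Unique_ID") := by
    rw [pv_dict_items l _ hnd (fun p _ => PySem.Dict.contains_empty ..)]
    simp [PySem.Dict.empty]
  have hvals : (l.foldl pvStepA PySem.Dict.empty).values
      = (l.filter (fun p => p.1 != "Unique_ID")).map Prod.snd := by
    simp only [PySem.Dict.values, hitems]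
  set vals := (l.filter (fun p => p.1 != "Unique_ID")).map Prod.snd with hvl
  have hbest : l.foldl pvStepB (none, none) = (vals.max?, pvSndmax vals) := by
    rw [pv_foldB_skip, pv_fold2]
  rw [hitems, hvals, hbest]
  set u := PySem.List.sorted (PySem.Set.ofList vals) (fun x => x) true with hu
  have hslice : PySem.List.slice u none (some 2) = u.take 2 := by
    have h := PySem.List.slice_to_natCast u 2
    norm_num at h
    exact h
  rw [hslice]
  have hle := PySem.List.sorted_pairwise_rev (PySem.Set.ofList vals) (fun x => x)
  have hnodupu : u.Nodup :=
    ((PySem.List.sorted_perm (PySem.Set.ofList vals) (fun x => x) true).nodup_iff).mpr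
      (PySem.Set.nodup_ofList vals)
  have hpw : u.Pairwise (fun a b => b < a) := by
    have hand := List.Pairwise.and hle hnodupu
    exact hand.imp (fun h => lt_of_le_of_ne h.1 (fun e => h.2 e.symm))
  have hmem : ∀ x, x ∈ u ↔ x ∈ vals := fun x =>
    (PySem.List.mem_sorted (PySem.Set.ofList vals) (fun x => x) true x).trans
      (PySem.Set.mem_ofList vals x)
  have htop : (if 2 ≤ u.length then u.take 2 else if u.length = 1 then u else [])
      = pvTop vals := pv_topA u vals hpw hmem
  rw [htop]
  have hpt : ∀ p ∈ l.filter (fun p => p.1 != "Unique_ID"),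
      ((pvTop vals).contains p.2)
        = ((vals.max? == some p.2) || (pvSndmax vals == some p.2)) := by
    intro p hp
    have hm : p.2 ∈ vals := hvl ▸ List.mem_map_of_mem hp
    cases hmax : vals.max? with
    | none =>
      rw [List.max?_eq_none_iff] at hmax
      rw [hmax] at hm
      cases hm
    | some M =>
      simp only [pvTop, pvSndmax, hmax]
      cases h2 : (vals.filter (fun x => decide (x ≠ M))).max? with
      | none =>
        by_cases e1 : p.2 = M <;> (simp [e1]; try omega)
      | some M2 =>
        by_cases e1 : p.2 = M <;> by_cases e2 : p.2 = M2 <;> (simp [e1, e2]; try omega)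
  have hX : (l.filter (fun p => p.1 != "Unique_ID")).filter (fun p => (pvTop vals).contains p.2)
      = l.filter (fun p => p.1 != "Unique_ID"
          && ((vals.max? == some p.2) || (pvSndmax vals == some p.2))) := by
    rw [List.filter_congr hpt, List.filter_filter]
    exact List.filter_congr (fun x _ => by rw [Bool.and_comm])
  rw [hX]

-- ===== VERDICT (by name: the statement is the Claim_ definition above) =====
theorem find_top_interests_spec : Claim_equal_find_top_interests := by
  intro row _
  exact pv_main row
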